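-- pv_equiv track=rewrite | github.com/gaelduong/twenty-one | test.py | get_maximum_number_of_sub_set
-- ===== SOURCE A (Python) =====
-- def get_maximum_number_of_sub_set(sub_sets):
--     all_combos = []
--     for sub_set in sub_sets:
--         distinct_sub_sets = [sub_set]
--         for sub_set_2 in sub_sets:
--             if len([x for x in sub_set if x in sub_set_2]) == 0:
--                 distinct_sub_sets.append(sub_set_2)
--         all_combos.append(distinct_sub_sets)
--
--     return max(all_combos,key=len)
-- ===== SOURCE B (Python) =====
-- def get_maximum_number_of_sub_set(sub_sets):
--     n = len(sub_sets)
--     # inverted index: element value -> set of indices of subsets containing it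
--     index = {}
--     for i, s in enumerate(sub_sets):
--         for x in s:
--             index.setdefault(x, set()).add(i)
--     best_i = -1
--     best_blocked = set()
--     best_score = 0
--     for i, s in enumerate(sub_sets):
--         blocked = set()
--         for x in s:
--             blocked |= index[x]
--         score = 1 + sum(1 for j in range(n) if j not in blocked)
--         if best_score < score:
--             best_i, best_blocked, best_score = i, blocked, score
--     return [sub_sets[best_i]] + [sub_sets[j] for j in range(n) if j not in best_blocked]
-- ===== Notes on version B (the rewrite author's own statement) =====
-- stated objective: faster
-- what changed: B builds an inverted index (element -> set of subset indices) once, computes each subset's blocked index-set by unioning index entries, and tracks the first best score in a single pass, instead of A's materialising, for every subset, the full partner list via a pairwise rescan of all subsets and taking max(..., key=len).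
-- outside the precondition, e.g. on get_maximum_number_of_sub_set([]): A raises ValueError, B raises IndexError
import Mathlib
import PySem

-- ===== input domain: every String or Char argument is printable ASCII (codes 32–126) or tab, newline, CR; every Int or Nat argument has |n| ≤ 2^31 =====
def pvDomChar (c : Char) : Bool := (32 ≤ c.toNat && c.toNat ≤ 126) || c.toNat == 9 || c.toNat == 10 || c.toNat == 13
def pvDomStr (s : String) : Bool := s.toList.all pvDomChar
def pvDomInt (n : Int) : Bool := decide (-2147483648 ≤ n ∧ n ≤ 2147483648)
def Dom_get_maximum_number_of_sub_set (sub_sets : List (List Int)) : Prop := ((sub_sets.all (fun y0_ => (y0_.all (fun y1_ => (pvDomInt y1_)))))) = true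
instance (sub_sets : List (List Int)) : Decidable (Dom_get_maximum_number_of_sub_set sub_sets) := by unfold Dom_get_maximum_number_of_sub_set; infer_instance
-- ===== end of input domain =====

-- B replaces A's quadratic pairwise rescans by an inverted index (element -> set of
-- subset indices) and a single best-score pass; return-value equivalence on nonempty input.

-- ===== PORT A =====
def get_maximum_number_of_sub_set (sub_sets : List (List Int)) : List (List Int) :=
  let all_combos :=
    sub_sets.foldl (fun acc sub_set =>
      acc ++ [sub_sets.foldl (fun ds sub_set_2 =>
        if ((sub_set.filter (fun x => sub_set_2.contains x)).length == 0)
        then ds ++ [sub_set_2] else ds) [sub_set]]) []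
  -- max(all_combos, key=len); Python raises ValueError when sub_sets = [] (excluded by Pre_)
  (PySem.List.max? all_combos (fun c => c.length)).getD []

-- ===== PORT B =====
def get_maximum_number_of_sub_set_alt (sub_sets : List (List Int)) : List (List Int) :=
  let n : Int := sub_sets.length
  let index : PySem.Dict Int (PySem.Set Int) :=
    (PySem.List.enumerate sub_sets 0).foldl
      (fun d p => p.2.foldl (fun d x => d.insert x (PySem.Set.add (d.getD x PySem.Set.empty) p.1)) d)
      PySem.Dict.empty
  let best :=
    (PySem.List.enumerate sub_sets 0).foldl
      (fun st p =>
        -- index[x] never raises here: every x of p.2 was inserted by the index loop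
        let blocked := p.2.foldl (fun b x => PySem.Set.union b (index.getD x PySem.Set.empty)) PySem.Set.empty
        let score := 1 + ((PySem.List.pyRange 0 n 1).filter (fun j => !(PySem.Set.contains blocked j))).length
        if st.2.2 < score then (p.1, (blocked, score)) else st)
      ((-1 : Int), (PySem.Set.empty : PySem.Set Int), (0 : Nat))
  -- sub_sets[best_i] / sub_sets[j]: indices are in range for nonempty input (Pre_)
  PySem.List.pyGetD sub_sets best.1 [] ::
    ((PySem.List.pyRange 0 n 1).filter (fun j => !(PySem.Set.contains best.2.1 j))).map
      (fun j => PySem.List.pyGetD sub_sets j [])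

-- ===== PRECONDITION & SPEC =====
-- Pre_ excludes only sub_sets = [], where A raises ValueError (max of an empty sequence).
def Pre_get_maximum_number_of_sub_set (sub_sets : List (List Int)) : Prop := sub_sets ≠ []
instance (sub_sets : List (List Int)) : Decidable (Pre_get_maximum_number_of_sub_set sub_sets) := by unfold Pre_get_maximum_number_of_sub_set; infer_instance
def pvWitness_get_maximum_number_of_sub_set : List (List Int) := [[1, 2], [3], [1]]

def Spec_get_maximum_number_of_sub_set (sub_sets : List (List Int)) (out : List (List Int)) : Prop := out = get_maximum_number_of_sub_set_alt sub_sets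
instance (sub_sets : List (List Int)) (out : List (List Int)) : Decidable (Spec_get_maximum_number_of_sub_set sub_sets out) := by unfold Spec_get_maximum_number_of_sub_set; infer_instance

-- ===== CLAIM (what is proved, stated in full; the proofs are below) =====
def Claim_equal_get_maximum_number_of_sub_set : Prop := ∀ (sub_sets : List (List Int)), Dom_get_maximum_number_of_sub_set sub_sets → Pre_get_maximum_number_of_sub_set sub_sets → Spec_get_maximum_number_of_sub_set sub_sets (get_maximum_number_of_sub_set sub_sets)

-- ===== LEMMAS AND PROOFS =====

-- the disjointness test A applies
def pvP (s t : List Int) : Bool := (s.filter (fun x => t.contains x)).length == 0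

-- the list A collects for subset s
def pvCombo (ss : List (List Int)) (s : List Int) : List (List Int) := s :: ss.filter (pvP s)

-- B's inverted index
def pvIdx (ss : List (List Int)) : PySem.Dict Int (PySem.Set Int) :=
  (PySem.List.enumerate ss 0).foldl
    (fun d p => p.2.foldl (fun d x => d.insert x (PySem.Set.add (d.getD x PySem.Set.empty) p.1)) d)
    PySem.Dict.empty

-- B's blocked set for subset s
def pvBlk (ss : List (List Int)) (s : List Int) : PySem.Set Int :=
  s.foldl (fun b x => PySem.Set.union b ((pvIdx ss).getD x PySem.Set.empty)) PySem.Set.empty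

-- B's partner list rebuilt from a blocked set
def pvTail (ss : List (List Int)) (b : PySem.Set Int) : List (List Int) :=
  ((PySem.List.pyRange 0 (ss.length : Int) 1).filter (fun j => !(PySem.Set.contains b j))).map
    (fun j => PySem.List.pyGetD ss j [])

-- B's best-tracking step
def pvStepB (ss : List (List Int)) (st : Int × PySem.Set Int × Nat) (p : Int × List Int) :
    Int × PySem.Set Int × Nat :=
  let blocked := pvBlk ss p.2
  let score := 1 + ((PySem.List.pyRange 0 (ss.length : Int) 1).filter (fun j => !(PySem.Set.contains blocked j))).length
  if st.2.2 < score then (p.1, (blocked, score)) else st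

lemma pvA_shape (ss : List (List Int)) :
    get_maximum_number_of_sub_set ss
      = (PySem.List.max? (ss.map (pvCombo ss)) (fun c => c.length)).getD [] := by
  unfold get_maximum_number_of_sub_set
  have h1 : ∀ s : List Int,
      ss.foldl (fun ds t => if ((s.filter (fun x => t.contains x)).length == 0)
        then ds ++ [t] else ds) [s] = pvCombo ss s := by
    intro s
    exact PySem.List.foldl_append_if_eq_filter (p := fun t => pvP s t) (l := ss) (acc := [s])
  simp only [PySem.List.foldl_append_singleton_eq_map, h1, List.nil_append]

lemma pvB_shape (ss : List (List Int)) :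
    get_maximum_number_of_sub_set_alt ss
      = (let best := (PySem.List.enumerate ss 0).foldl (pvStepB ss) ((-1 : Int), (PySem.Set.empty : PySem.Set Int), (0 : Nat));
         PySem.List.pyGetD ss best.1 [] :: pvTail ss best.2.1) := by
  rfl

-- dict inner loop: inserting index i for every element of s
lemma pvIdx_inner (s : List Int) :
    ∀ (d : PySem.Dict Int (PySem.Set Int)) (i x j : Int),
      (j ∈ (s.foldl (fun d y => d.insert y (PySem.Set.add (d.getD y PySem.Set.empty) i)) d).getD x PySem.Set.empty)
        ↔ j ∈ d.getD x PySem.Set.empty ∨ (x ∈ s ∧ j = i) := by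
  induction s with
  | nil => intro d i x j; simp
  | cons y s ih =>
    intro d i x j
    simp only [List.foldl_cons, ih]
    rw [PySem.Dict.getD_insert]
    by_cases hxy : x = y
    · subst hxy
      rw [if_pos rfl]
      simp only [PySem.Set.mem_add, List.mem_cons]
      tauto
    · rw [if_neg hxy]
      simp only [List.mem_cons]
      have : ¬ x = y := hxy
      tauto

-- dict outer loop over enumerated subsets
lemma pvIdx_outer :
    ∀ (zs : List (Int × List Int)) (d : PySem.Dict Int (PySem.Set Int)) (x j : Int),
      (j ∈ (zs.foldl
          (fun d p => p.2.foldl (fun d x => d.insert x (PySem.Set.add (d.getD x PySem.Set.empty) p.1)) d)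
          d).getD x PySem.Set.empty)
        ↔ j ∈ d.getD x PySem.Set.empty ∨ ∃ p ∈ zs, x ∈ p.2 ∧ j = p.1 := by
  intro zs
  induction zs with
  | nil => intro d x j; simp
  | cons p zs ih =>
    intro d x j
    simp only [List.foldl_cons, ih, pvIdx_inner]
    constructor
    · rintro ((h | ⟨h1, h2⟩) | ⟨q, hq, h1, h2⟩)
      · exact Or.inl h
      · exact Or.inr ⟨p, by simp, h1, h2⟩
      · exact Or.inr ⟨q, by simp [hq], h1, h2⟩
    · rintro (h | ⟨q, hq, h1, h2⟩)
      · exact Or.inl (Or.inl h)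
      · rcases List.mem_cons.mp hq with rfl | hq
        · exact Or.inl (Or.inr ⟨h1, h2⟩)
        · exact Or.inr ⟨q, hq, h1, h2⟩

lemma pvIdx_mem (ss : List (List Int)) (x j : Int) :
    j ∈ (pvIdx ss).getD x PySem.Set.empty
      ↔ ∃ (k : Nat) (_ : k < ss.length), x ∈ ss[k] ∧ j = (k : Int) := by
  unfold pvIdx
  rw [pvIdx_outer]
  simp only [PySem.Dict.getD_empty]
  constructor
  · rintro (h | ⟨p, hp, h1, h2⟩)
    · simp [PySem.Set.empty] at h
    · rcases (PySem.List.mem_enumerate_iff _ _ _).mp hp with ⟨k, hk, rfl⟩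
      exact ⟨k, hk, by simpa using h1, by simpa using h2⟩
  · rintro ⟨k, hk, h1, h2⟩
    exact Or.inr ⟨((k : Int), ss[k]), (PySem.List.mem_enumerate_iff _ _ _).mpr ⟨k, hk, by simp⟩, h1, h2⟩

lemma pvBlk_mem (ss : List (List Int)) (s : List Int) (j : Int) :
    j ∈ pvBlk ss s ↔ ∃ x ∈ s, j ∈ (pvIdx ss).getD x PySem.Set.empty := by
  unfold pvBlk
  suffices h : ∀ (b : PySem.Set Int),
      j ∈ s.foldl (fun b x => PySem.Set.union b ((pvIdx ss).getD x PySem.Set.empty)) b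
        ↔ j ∈ b ∨ ∃ x ∈ s, j ∈ (pvIdx ss).getD x PySem.Set.empty by
    rw [h]; simp [PySem.Set.empty]
  induction s with
  | nil => intro b; simp
  | cons y s ih =>
    intro b
    simp only [List.foldl_cons, ih, PySem.Set.mem_union]
    constructor
    · rintro ((h | h) | ⟨x, hx, h⟩)
      · tauto
      · exact Or.inr ⟨y, by simp, h⟩
      · exact Or.inr ⟨x, by simp [hx], h⟩
    · rintro (h | ⟨x, hx, h⟩)
      · tauto
      · rcases List.mem_cons.mp hx with rfl | hx
        · tauto
        · exact Or.inr ⟨x, hx, h⟩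

lemma pvBlk_contains (ss : List (List Int)) (s : List Int) (k : Nat) (hk : k < ss.length) :
    (!(PySem.Set.contains (pvBlk ss s) (k : Int))) = pvP s ss[k] := by
  have hmem : (k : Int) ∈ pvBlk ss s ↔ ∃ x ∈ s, x ∈ ss[k] := by
    rw [pvBlk_mem]
    constructor
    · rintro ⟨x, hx, h⟩
      rcases (pvIdx_mem ss x (k : Int)).mp h with ⟨k', hk', h1, h2⟩
      have : k' = k := by exact_mod_cast h2.symm
      exact ⟨x, hx, by simpa [this] using h1⟩
    · rintro ⟨x, hx, h⟩
      exact ⟨x, hx, (pvIdx_mem ss x (k : Int)).mpr ⟨k, hk, h, rfl⟩⟩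
  have hP : pvP s ss[k] = true ↔ ∀ x ∈ s, x ∉ ss[k] := by
    simp [pvP, List.filter_eq_nil_iff, List.length_eq_zero_iff]
  by_cases h : (k : Int) ∈ pvBlk ss s
  · rcases hmem.mp h with ⟨x, hx, hx2⟩
    have hf : pvP s ss[k] = false := by
      cases hp : pvP s ss[k] with
      | false => rfl
      | true => exact absurd hx2 ((hP.mp hp) x hx)
    have hc : PySem.Set.contains (pvBlk ss s) (k : Int) = true := (PySem.Set.contains_iff _ _).mpr h
    simp only [hc, Bool.not_true, hf]
  · have ht : pvP s ss[k] = true := hP.mpr (fun x hx hx2 => h (hmem.mpr ⟨x, hx, hx2⟩))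
    have hc : PySem.Set.contains (pvBlk ss s) (k : Int) = false := by
      cases hcc : PySem.Set.contains (pvBlk ss s) (k : Int) with
      | false => rfl
      | true => exact absurd ((PySem.Set.contains_iff _ _).mp hcc) h
    simp only [hc, Bool.not_false, ht]

-- generic: selecting by index over range, then reading back, is a filter
lemma pvFilterRange (xs : List (List Int)) (p : List Int → Bool) (d : List Int)
    (q : Nat → Bool) (hq : ∀ k, (h : k < xs.length) → q k = p xs[k]) :
    ((List.range xs.length).filter q).map (fun k => xs.getD k d) = xs.filter p := by
  induction xs using List.reverseRecOn with
  | nil => simp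
  | append_singleton ys a ih =>
    have hlen : (ys ++ [a]).length = ys.length + 1 := by simp
    rw [hlen, List.range_succ, List.filter_append, List.map_append]
    have h1 : ((List.range ys.length).filter q).map (fun k => (ys ++ [a]).getD k d)
        = ((List.range ys.length).filter q).map (fun k => ys.getD k d) := by
      apply List.map_congr_left
      intro k hk
      have hk' : k < ys.length := by
        have := List.mem_filter.mp hk
        simpa using List.mem_range.mp this.1
      simp [List.getD, List.getElem?_append_left hk']
    have hq' : ∀ k, (h : k < ys.length) → q k = p ys[k] := by
      intro k h
      have := hq k (by simp; omega)
      simpa [List.getElem_append, h] using this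
    have hqa : q ys.length = p a := by
      have := hq ys.length (by simp)
      simpa [List.getElem_concat_length rfl] using this
    rw [h1, ih hq', List.filter_append]
    by_cases hpa : p a = true
    · simp [hpa, hqa]
    · have hpf : p a = false := by simpa using hpa
      simp [hpf, hqa]

lemma pvTail_eq (ss : List (List Int)) (s : List Int) :
    pvTail ss (pvBlk ss s) = ss.filter (pvP s) := by
  unfold pvTail
  rw [PySem.List.pyRange_one]
  simp only [sub_zero, Int.toNat_natCast, zero_add, List.filter_map, List.map_map,
    Function.comp_def]
  have h2 : ((List.range ss.length).filter (fun k : Nat => !(PySem.Set.contains (pvBlk ss s) (k : Int)))).map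
        (fun k : Nat => PySem.List.pyGetD ss (k : Int) [])
      = ((List.range ss.length).filter (fun k : Nat => !(PySem.Set.contains (pvBlk ss s) (k : Int)))).map
        (fun k => ss.getD k []) :=
    List.map_congr_left (fun k _ => by simp [PySem.List.pyGetD_natCast])
  rw [h2]
  exact pvFilterRange ss (pvP s) [] _ (fun k h => pvBlk_contains ss s k h)

lemma pvScore_eq (ss : List (List Int)) (s : List Int) :
    1 + ((PySem.List.pyRange 0 (ss.length : Int) 1).filter (fun j => !(PySem.Set.contains (pvBlk ss s) j))).length
      = (pvCombo ss s).length := by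
  have h : ((PySem.List.pyRange 0 (ss.length : Int) 1).filter (fun j => !(PySem.Set.contains (pvBlk ss s) j))).length
      = (pvTail ss (pvBlk ss s)).length := by
    unfold pvTail; simp
  rw [h, pvTail_eq]
  simp only [pvCombo, List.length_cons]
  omega

-- the A-side running max with key = length
def pvMaxStep (m c : List (List Int)) : List (List Int) :=
  if m.length < c.length then c else m

lemma pvMax?_cons : ∀ (cs : List (List (List Int))) (c : List (List Int)),
    PySem.List.max? (c :: cs) (fun c => c.length) = some (cs.foldl pvMaxStep c) := by
  intro cs
  induction cs with
  | nil => intro c; rfl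
  | cons x cs ih =>
    intro c
    have h1 : PySem.List.max? (c :: x :: cs) (fun c : List (List Int) => c.length)
        = PySem.List.max? (pvMaxStep c x :: cs) (fun c => c.length) := by
      by_cases h : c.length < x.length
      · simp [PySem.List.max?, List.foldl_cons, pvMaxStep, h]
      · simp [PySem.List.max?, List.foldl_cons, pvMaxStep, h]
    rw [h1, ih, List.foldl_cons]

-- main invariant: B's best-tracking fold computes the running max A takes
lemma pvFold_inv (ss : List (List Int)) :
    ∀ (zs : List (Int × List Int)),
      (∀ p ∈ zs, PySem.List.pyGetD ss p.1 [] = p.2) →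
      ∀ (i : Int) (b : PySem.Set Int) (m : List (List Int)),
        PySem.List.pyGetD ss i [] :: pvTail ss b = m →
        (PySem.List.pyGetD ss (zs.foldl (pvStepB ss) (i, b, m.length)).1 []
            :: pvTail ss (zs.foldl (pvStepB ss) (i, b, m.length)).2.1
          = zs.foldl (fun m p => pvMaxStep m (pvCombo ss p.2)) m
        ∧ (zs.foldl (pvStepB ss) (i, b, m.length)).2.2
          = (zs.foldl (fun m p => pvMaxStep m (pvCombo ss p.2)) m).length) := by
  intro zs
  induction zs with
  | nil =>
    intro _ i b m hm
    exact ⟨hm, rfl⟩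
  | cons p zs ih =>
    intro hv i b m hm
    have hvp : PySem.List.pyGetD ss p.1 [] = p.2 := hv p (by simp)
    have hv' : ∀ q ∈ zs, PySem.List.pyGetD ss q.1 [] = q.2 := fun q hq => hv q (by simp [hq])
    rw [List.foldl_cons, List.foldl_cons]
    have hstep : pvStepB ss (i, b, m.length) p
        = if m.length < (pvCombo ss p.2).length
          then (p.1, (pvBlk ss p.2, (pvCombo ss p.2).length)) else (i, b, m.length) := by
      unfold pvStepB
      simp only [pvScore_eq]
    by_cases h : m.length < (pvCombo ss p.2).length
    · rw [hstep, if_pos h]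
      have hmax : pvMaxStep m (pvCombo ss p.2) = pvCombo ss p.2 := by
        simp [pvMaxStep, h]
      rw [hmax]
      exact ih hv' p.1 (pvBlk ss p.2) (pvCombo ss p.2)
        (by rw [hvp, pvTail_eq]; rfl)
    · rw [hstep, if_neg h]
      have hmax : pvMaxStep m (pvCombo ss p.2) = m := by
        simp [pvMaxStep, h]
      rw [hmax]
      exact ih hv' i b m hm

lemma pvEnum_valid (ss : List (List Int)) :
    ∀ p ∈ PySem.List.enumerate ss 0, PySem.List.pyGetD ss p.1 [] = p.2 := by
  intro p hp
  rcases (PySem.List.mem_enumerate_iff _ _ _).mp hp with ⟨k, hk, rfl⟩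
  simp [PySem.List.pyGetD_natCast, List.getD_eq_getElem?_getD, hk]

-- ===== VERDICT (by name: the statement is the Claim_ definition above) =====
theorem get_maximum_number_of_sub_set_spec : Claim_equal_get_maximum_number_of_sub_set := by
  intro ss _ hpre
  unfold Spec_get_maximum_number_of_sub_set
  rw [pvA_shape, pvB_shape]
  cases ss with
  | nil => exact absurd rfl hpre
  | cons s rest =>
    have henum : PySem.List.enumerate (s :: rest) 0 = (0, s) :: PySem.List.enumerate rest 1 := by
      rw [PySem.List.enumerate_cons]; norm_num
    have hget0 : PySem.List.pyGetD (s :: rest) (0 : Int) [] = s := by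
      simp
    have hstep0 : pvStepB (s :: rest) ((-1 : Int), (PySem.Set.empty : PySem.Set Int), (0 : Nat)) (0, s)
        = (0, (pvBlk (s :: rest) s, (pvCombo (s :: rest) s).length)) := by
      unfold pvStepB
      simp only [pvScore_eq]
      have : (0 : Nat) < (pvCombo (s :: rest) s).length := by simp [pvCombo]
      simp [this]
    have hm0 : PySem.List.pyGetD (s :: rest) (0 : Int) [] :: pvTail (s :: rest) (pvBlk (s :: rest) s)
        = pvCombo (s :: rest) s := by
      rw [hget0, pvTail_eq]; rfl
    have hv' : ∀ p ∈ PySem.List.enumerate rest 1, PySem.List.pyGetD (s :: rest) p.1 [] = p.2 := by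
      intro p hp
      exact pvEnum_valid (s :: rest) p (by rw [henum]; exact List.mem_cons_of_mem _ hp)
    have hinv := pvFold_inv (s :: rest) (PySem.List.enumerate rest 1) hv'
      0 (pvBlk (s :: rest) s) (pvCombo (s :: rest) s) hm0
    -- A side: the running max over the mapped combos
    have hA : (PySem.List.max? ((s :: rest).map (pvCombo (s :: rest))) (fun c => c.length)).getD []
        = (PySem.List.enumerate rest 1).foldl
            (fun m p => pvMaxStep m (pvCombo (s :: rest) p.2)) (pvCombo (s :: rest) s) := by
      rw [List.map_cons, pvMax?_cons, Option.getD_some]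
      have h1 : (rest.map (pvCombo (s :: rest))).foldl pvMaxStep (pvCombo (s :: rest) s)
          = rest.foldl (fun m t => pvMaxStep m (pvCombo (s :: rest) t)) (pvCombo (s :: rest) s) :=
        List.foldl_map
      have h2 := List.foldl_map (f := fun p : Int × List Int => p.2)
        (g := fun m t => pvMaxStep m (pvCombo (s :: rest) t))
        (l := PySem.List.enumerate rest 1) (init := pvCombo (s :: rest) s)
      rw [PySem.List.map_snd_enumerate] at h2
      rw [h1]
      exact h2
    -- B side: unfold the first step of the fold
    have hB : (PySem.List.enumerate (s :: rest) 0).foldl (pvStepB (s :: rest))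
          ((-1 : Int), (PySem.Set.empty : PySem.Set Int), (0 : Nat))
        = (PySem.List.enumerate rest 1).foldl (pvStepB (s :: rest))
            (0, (pvBlk (s :: rest) s, (pvCombo (s :: rest) s).length)) := by
      rw [henum, List.foldl_cons, hstep0]
    simp only [hB]
    rw [hA]
    exact hinv.1.symm
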